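-- pv_equiv track=rewrite | github.com/cyeinfpro/PhotoPanel | app.py | normalize_album_folder_path
-- ===== SOURCE A (Python) =====
-- def normalize_album_folder_path(raw_folder):
--     rel = str(raw_folder or "").strip().replace("\\", "/")
--     if not rel:
--         return ""
--
--     parts = []
--     for part in rel.split("/"):
--         p = part.strip()
--         if not p or p == ".":
--             continue
--         if p == "..":
--             return None
--         parts.append(p)
--     return "/".join(parts)
-- ===== SOURCE B (Python) =====
-- def normalize_album_folder_path(raw_folder):
--     rel = str(raw_folder or "").strip().replace("\\", "/")
--     if not rel:
--         return ""
--     seg = ""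
--     out = ""
--     for ch in rel + "/":
--         if ch == "/":
--             p = seg.strip()
--             if p == "..":
--                 return None
--             if p and p != ".":
--                 out = p if not out else out + "/" + p
--             seg = ""
--         else:
--             seg = seg + ch
--     return out
-- ===== Notes on version B (the rewrite author's own statement) =====
-- stated objective: alternative
-- what changed: Replaced A's split('/')-then-loop-over-parts algorithm with a single character-level streaming scan that never builds a parts list: segments are cut at '/' on the fly with an explicit segment buffer and the output string is grown incrementally with manual separator insertion instead of a final join.
import Mathlib
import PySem

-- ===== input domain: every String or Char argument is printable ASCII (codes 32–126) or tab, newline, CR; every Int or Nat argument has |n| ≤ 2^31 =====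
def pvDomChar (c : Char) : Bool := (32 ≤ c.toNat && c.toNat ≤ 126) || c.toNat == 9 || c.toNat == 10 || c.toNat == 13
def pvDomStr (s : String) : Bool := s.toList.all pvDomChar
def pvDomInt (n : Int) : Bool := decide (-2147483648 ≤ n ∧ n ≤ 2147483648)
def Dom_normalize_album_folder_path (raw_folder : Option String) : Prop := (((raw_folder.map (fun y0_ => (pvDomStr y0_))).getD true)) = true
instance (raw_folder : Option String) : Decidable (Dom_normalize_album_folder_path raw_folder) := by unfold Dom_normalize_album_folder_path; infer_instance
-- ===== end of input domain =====

-- B replaces A's split-into-parts loop with a single character-level streaming scan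
-- (no split, no parts list: segments are cut at '/' on the fly and the output string
-- is grown incrementally); objective: alternative.


-- ===== PORT A =====
-- A's fused for-loop over rel.split("/"): strip each part, skip empty/'.',
-- early-return None on '..', append otherwise, join at the end.
def pvALoop : List String → List String → Option String
  | [], acc => some (PySem.Str.join "/" acc)
  | part :: rest, acc =>
    let p := PySem.Str.strip part
    if p = "" ∨ p = "." then pvALoop rest acc
    else if p = ".." then none
    else pvALoop rest (acc ++ [p])

def normalize_album_folder_path (raw_folder : Option String) : Option String :=
  let rel := PySem.Str.replace (PySem.Str.strip (raw_folder.getD "")) "\\" "/"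
  if rel = "" then some ""
  else pvALoop ((PySem.Str.split? rel "/").getD []) []

-- ===== PORT B =====
-- B's streaming scan over the characters of rel + "/": `seg` is the current raw
-- segment, `out` the output built so far; at each '/' the segment is finalized.
def pvBScan : List Char → List Char → List Char → Option (List Char)
  | [], _seg, out => some out
  | c :: rest, seg, out =>
    if c = '/' then
      let p := PySem.Chars.strip seg
      if p = ['.', '.'] then none
      else if p ≠ [] ∧ p ≠ ['.'] then
        pvBScan rest [] (if out = [] then p else out ++ '/' :: p)
      else pvBScan rest [] out
    else pvBScan rest (seg ++ [c]) out

def normalize_album_folder_path_alt (raw_folder : Option String) : Option String :=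
  let rel := PySem.Str.replace (PySem.Str.strip (raw_folder.getD "")) "\\" "/"
  if rel = "" then some ""
  else (pvBScan (rel.toList ++ ['/']) [] []).map String.ofList

-- ===== PRECONDITION & SPEC =====
def Spec_normalize_album_folder_path (raw_folder : Option String) (out : Option String) : Prop := out = normalize_album_folder_path_alt raw_folder
instance (raw_folder : Option String) (out : Option String) : Decidable (Spec_normalize_album_folder_path raw_folder out) := by unfold Spec_normalize_album_folder_path; infer_instance

-- ===== CLAIM (what is proved, stated in full; the proofs are below) =====
def Claim_equal_normalize_album_folder_path : Prop := ∀ (raw_folder : Option String), Dom_normalize_album_folder_path raw_folder → Spec_normalize_album_folder_path raw_folder (normalize_album_folder_path raw_folder)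

-- ===== LEMMAS AND PROOFS =====

-- Splitting a char list on '/', head-prefix form (proof-only helper).
def pvSplit : List Char → List Char → List (List Char)
  | pre, [] => [pre]
  | pre, c :: rest => if c = '/' then pre :: pvSplit [] rest else pvSplit (pre ++ [c]) rest

-- Incremental join used by B's scan (proof-only helper).
def pvJoinA (out : List Char) (ps : List (List Char)) : List Char :=
  ps.foldl (fun o p => if o = [] then p else o ++ '/' :: p) out

lemma pvSplitOn_go_slash : ∀ (fuel : Nat) (l cur : List Char) (acc : List (List Char)),
    l.length < fuel →
    PySem.Chars.splitOn.go ['/'] fuel l cur acc = acc.reverse ++ pvSplit cur.reverse l := by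
  intro fuel
  induction fuel with
  | zero => intro l cur acc h; omega
  | succ n ih =>
    intro l cur acc h
    cases l with
    | nil => simp [PySem.Chars.splitOn.go, pvSplit]
    | cons c rest =>
      by_cases hc : c = '/'
      · subst hc
        have hpre : (['/'] : List Char).isPrefixOf ('/' :: rest) = true := by
          simp [List.isPrefixOf]
        rw [PySem.Chars.splitOn.go]
        simp only [hpre, if_true, List.length_nil, Nat.zero_add, List.drop_succ_cons, List.drop_zero, List.length_cons] at *
        rw [ih rest [] (cur.reverse :: acc) (by simpa using Nat.lt_of_succ_lt_succ h)]
        simp [pvSplit]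
      · have hpre : (['/'] : List Char).isPrefixOf (c :: rest) = false := by
          simp [List.isPrefixOf, Ne.symm hc]
        rw [PySem.Chars.splitOn.go]
        simp only [hpre, Bool.false_eq_true, if_false]
        rw [ih rest (c :: cur) acc (by simpa using Nat.lt_of_succ_lt_succ h)]
        simp [pvSplit, hc]

lemma pvSplitOn_slash (cs : List Char) :
    PySem.Chars.splitOn cs ['/'] = pvSplit [] cs := by
  unfold PySem.Chars.splitOn
  rw [pvSplitOn_go_slash (cs.length + 1) cs [] [] (by omega)]
  simp

lemma pvJoinA_of_ne (ps : List (List Char)) : ∀ (out : List Char), out ≠ [] →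
    pvJoinA out ps = PySem.Chars.join ['/'] (out :: ps) := by
  induction ps with
  | nil => intro out _; simp [pvJoinA, PySem.Chars.join_singleton]
  | cons p ps ih =>
    intro out hout
    have h1 : pvJoinA out (p :: ps) = pvJoinA (out ++ '/' :: p) ps := by
      simp [pvJoinA, hout]
    rw [h1, ih (out ++ '/' :: p) (by simp)]
    cases ps with
    | nil =>
      simp [PySem.Chars.join_singleton, PySem.Chars.join_cons_cons]
    | cons q ps' =>
      rw [PySem.Chars.join_cons_cons, PySem.Chars.join_cons_cons]
      rw [PySem.Chars.join_cons_cons]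
      simp

lemma pvJoinA_nil (ps : List (List Char)) (h : ∀ p ∈ ps, p ≠ []) :
    pvJoinA [] ps = PySem.Chars.join ['/'] ps := by
  cases ps with
  | nil => simp [pvJoinA, PySem.Chars.join_nil]
  | cons p ps' =>
    have hp : p ≠ [] := h p (by simp)
    have h1 : pvJoinA [] (p :: ps') = pvJoinA p ps' := by simp [pvJoinA]
    rw [h1, pvJoinA_of_ne ps' p hp]

-- Closed form of B's scan: stream (l ++ ['/']) with pending segment seg.
lemma pvBScan_eq : ∀ (l seg out : List Char),
    pvBScan (l ++ ['/']) seg out =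
      if ((pvSplit seg l).map PySem.Chars.strip).any (· == ['.', '.']) then none
      else some (pvJoinA out (((pvSplit seg l).map PySem.Chars.strip).filter
        (fun p => decide (p ≠ [] ∧ p ≠ ['.'])))) := by
  intro l
  induction l with
  | nil =>
    intro seg out
    simp only [List.nil_append, pvSplit, List.map_cons, List.map_nil, List.any_cons,
      List.any_nil, List.filter_cons, List.filter_nil]
    by_cases h2 : PySem.Chars.strip seg = ['.', '.']
    · simp [pvBScan, h2]
    · by_cases h1 : PySem.Chars.strip seg ≠ [] ∧ PySem.Chars.strip seg ≠ ['.']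
      · simp [pvBScan, h2, h1, pvJoinA]
      · have hd : decide (PySem.Chars.strip seg ≠ [] ∧ PySem.Chars.strip seg ≠ ['.']) = false := by
          simpa using h1
        simp [pvBScan, h2, h1, pvJoinA]
  | cons c rest ih =>
    intro seg out
    by_cases hc : c = '/'
    · subst hc
      simp only [List.cons_append, pvSplit, if_true, List.map_cons, List.any_cons,
        List.filter_cons]
      show pvBScan ('/' :: (rest ++ ['/'])) seg out = _
      by_cases h2 : PySem.Chars.strip seg = ['.', '.']
      · simp [pvBScan, h2]
      · by_cases h1 : PySem.Chars.strip seg ≠ [] ∧ PySem.Chars.strip seg ≠ ['.']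
        · have hstep : pvBScan ('/' :: (rest ++ ['/'])) seg out =
              pvBScan (rest ++ ['/']) []
                (if out = [] then PySem.Chars.strip seg else out ++ '/' :: PySem.Chars.strip seg) := by
            simp [pvBScan, h2, h1]
          rw [hstep, ih]
          have hd : decide (PySem.Chars.strip seg ≠ [] ∧ PySem.Chars.strip seg ≠ ['.']) = true := by
            simpa using h1
          have hb : (PySem.Chars.strip seg == ['.', '.']) = false := by simp [h2]
          simp only [hd, hb, Bool.false_or, if_true]
          split
          · rfl
          · have : ∀ ps, pvJoinA out (PySem.Chars.strip seg :: ps) =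
                pvJoinA (if out = [] then PySem.Chars.strip seg else out ++ '/' :: PySem.Chars.strip seg) ps := by
              intro ps; simp [pvJoinA]
            rw [← this]
        · have hstep : pvBScan ('/' :: (rest ++ ['/'])) seg out = pvBScan (rest ++ ['/']) [] out := by
            simp [pvBScan, h2, h1]
          rw [hstep, ih]
          have hd : decide (PySem.Chars.strip seg ≠ [] ∧ PySem.Chars.strip seg ≠ ['.']) = false := by
            simpa using h1
          have hb : (PySem.Chars.strip seg == ['.', '.']) = false := by simp [h2]
          simp [hd, hb]
    · have hstep : pvBScan ((c :: rest) ++ ['/']) seg out = pvBScan (rest ++ ['/']) (seg ++ [c]) out := by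
        simp [pvBScan, hc]
      rw [hstep, ih]
      simp [pvSplit, hc]

-- Closed form of A's loop (string side).
lemma pvALoop_eq (l : List String) : ∀ acc : List String,
    pvALoop l acc =
      if (l.map PySem.Str.strip).any (· == "..") then none
      else some (PySem.Str.join "/" (acc ++ (l.map PySem.Str.strip).filter (fun p => decide (p ≠ "" ∧ p ≠ ".")))) := by
  induction l with
  | nil => intro acc; simp [pvALoop]
  | cons part rest ih =>
    intro acc
    simp only [pvALoop, List.map_cons, List.any_cons, List.filter_cons]
    by_cases h2 : PySem.Str.strip part = ".."
    · simp [h2]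
    · by_cases h1 : PySem.Str.strip part = "" ∨ PySem.Str.strip part = "."
      · rw [if_pos h1, ih acc]
        have hd : decide (PySem.Str.strip part ≠ "" ∧ PySem.Str.strip part ≠ ".") = false := by
          rcases h1 with h | h <;> simp [h]
        have hb : (PySem.Str.strip part == "..") = false := by simp [h2]
        simp [hd, hb]
      · rw [if_neg h1, if_neg h2, ih (acc ++ [PySem.Str.strip part])]
        have h1' : PySem.Str.strip part ≠ "" ∧ PySem.Str.strip part ≠ "." :=
          ⟨fun h => h1 (Or.inl h), fun h => h1 (Or.inr h)⟩
        have hd : decide (PySem.Str.strip part ≠ "" ∧ PySem.Str.strip part ≠ ".") = true := by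
          simp [h1'.1, h1'.2]
        have hb : (PySem.Str.strip part == "..") = false := by simp [h2]
        simp only [hd, hb, Bool.false_or, if_true, List.append_assoc, List.singleton_append]

-- String/char-list bridges for the pointwise operations both closed forms use.
lemma pvStrip_ofList (q : List Char) :
    PySem.Str.strip (String.ofList q) = String.ofList (PySem.Chars.strip q) := by
  apply String.toList_inj.mp
  simp [PySem.Str.toList_strip]

lemma pvJoin_ofList (rs : List (List Char)) :
    PySem.Str.join "/" (rs.map String.ofList) = String.ofList (PySem.Chars.join ['/'] rs) := by
  apply String.toList_inj.mp
  simp [PySem.Str.toList_join, List.map_map, Function.comp_def]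

lemma pvBeq_dotdot (q : List Char) : (String.ofList q == "..") = (q == ['.', '.']) := by
  rcases h : (q == ['.', '.']) with _ | _
  · simp at h ⊢
    intro hq; apply h; rw [← String.toList_ofList (l := q), hq]; rfl
  · simp at h ⊢; rw [h]

lemma pvPred_ofList (q : List Char) :
    decide (String.ofList q ≠ "" ∧ String.ofList q ≠ ".") = decide (q ≠ [] ∧ q ≠ ['.']) := by
  have h1 : (String.ofList q = "") ↔ (q = []) := by
    constructor
    · intro h; rw [← String.toList_ofList (l := q), h]; rfl
    · intro h; rw [h]
  have h2 : (String.ofList q = ".") ↔ (q = ['.']) := by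
    constructor
    · intro h; rw [← String.toList_ofList (l := q), h]; rfl
    · intro h; rw [h]
  simp [h1, h2]

-- The two closed forms agree: A on the split pieces, B on the raw character stream.
lemma pvBridge (cs : List Char) :
    pvALoop ((pvSplit [] cs).map String.ofList) [] =
      (pvBScan (cs ++ ['/']) [] []).map String.ofList := by
  rw [pvALoop_eq, pvBScan_eq]
  have hmapstrip : ((pvSplit [] cs).map String.ofList).map PySem.Str.strip
      = ((pvSplit [] cs).map PySem.Chars.strip).map String.ofList := by
    simp only [List.map_map]
    exact List.map_congr_left (fun q _ => pvStrip_ofList q)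
  rw [hmapstrip]
  have hany : (((pvSplit [] cs).map PySem.Chars.strip).map String.ofList).any (· == "..")
      = ((pvSplit [] cs).map PySem.Chars.strip).any (· == ['.', '.']) := by
    rw [List.any_map]
    simp only [Function.comp_def]
    rw [funext pvBeq_dotdot]
  rw [hany]
  split
  · simp
  · have hfilter : (((pvSplit [] cs).map PySem.Chars.strip).map String.ofList).filter
        (fun p => decide (p ≠ "" ∧ p ≠ "."))
        = (((pvSplit [] cs).map PySem.Chars.strip).filter
            (fun p => decide (p ≠ [] ∧ p ≠ ['.']))).map String.ofList := by
      rw [List.filter_map]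
      congr 1
      exact List.filter_congr (fun q _ => pvPred_ofList q)
    simp only [Option.map_some, List.nil_append, hfilter]
    rw [pvJoin_ofList]
    congr 1
    rw [pvJoinA_nil]
    intro p hp
    have := (List.mem_filter.mp hp).2
    simp at this
    exact this.1

-- ===== VERDICT (by name: the statement is the Claim_ definition above) =====
theorem normalize_album_folder_path_spec : Claim_equal_normalize_album_folder_path := by
  intro raw_folder _
  unfold Spec_normalize_album_folder_path
  simp only [normalize_album_folder_path, normalize_album_folder_path_alt]
  split
  · rfl
  · have hslash : ("/" : String).toList = ['/'] := rfl
    have hsplit : ∀ (rel : String), (PySem.Str.split? rel "/").getD []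
        = (pvSplit [] rel.toList).map String.ofList := by
      intro rel
      simp [PySem.Str.split?, PySem.Chars.split?, hslash, pvSplitOn_slash]
    rw [hsplit, pvBridge]
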